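-- pv_equiv track=rewrite | github.com/ShahriyarR/dp | lecture13/python/coin_change_no_more_than_t_coins.py | coin_change_no_more_than_t_coins
-- ===== SOURCE A (Python) =====
-- def coin_change_no_more_than_t_coins(n: int, t: int, coins: list[int]) -> int:
--     dp = [[0] * (t+1) for _ in range(n+1)]
--
--     dp[0][0] = 1
--
--     for i in range(n + 1):
--         for j in range(t + 1):
--             if i > 0 and j == 0:
--                 dp[i][j] = 0
--                 continue
--
--             if i == 0 and j > 0:
--                 dp[i][j] = 1
--                 continue
--
--             for coin in coins:
--                 if i - coin >= 0:
--                     dp[i][j] += dp[i-coin][j-1]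
--
--     return dp[n][t]
-- ===== SOURCE B (Python) =====
-- def coin_change_no_more_than_t_coins(n: int, t: int, coins: list[int]) -> int:
--     # Layered DP: L[i] = number of ordered sequences of exactly k coins summing
--     # to i; accumulate L[n] over k = 0..t instead of building the 2D table.
--     L = [0] * (n + 1)
--     L[0] = 1
--     answer = L[n]
--     for _ in range(t):
--         new = [0] * (n + 1)
--         for i in range(1, n + 1):
--             s = 0
--             for coin in coins:
--                 if i - coin >= 0:
--                     s += L[i - coin]
--             new[i] = s
--         answer += new[n]
--         L = new
--     return answer
-- ===== Notes on version B (the rewrite author's own statement) =====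
-- stated objective: alternative
-- what changed: B replaces A's full (n+1)x(t+1) at-most-j table with a rolling 1D layer of exactly-k-coin counts and a running accumulator, summing the layer's value at n over k = 0..t (O(n) space, no 2D table, no per-cell branch cases).
-- intended difference: On n=0, t=0 with 0 in coins, A's dp[0][-1] negative-index wraparound makes the cell add itself once per zero coin so A returns 2^(number of zero coins); B returns the intended 1 (the single empty sequence of at most 0 coins summing to 0). — e.g. on coin_change_no_more_than_t_coins(0, 0, [0]): A returns 2, B returns 1
import Mathlib
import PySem

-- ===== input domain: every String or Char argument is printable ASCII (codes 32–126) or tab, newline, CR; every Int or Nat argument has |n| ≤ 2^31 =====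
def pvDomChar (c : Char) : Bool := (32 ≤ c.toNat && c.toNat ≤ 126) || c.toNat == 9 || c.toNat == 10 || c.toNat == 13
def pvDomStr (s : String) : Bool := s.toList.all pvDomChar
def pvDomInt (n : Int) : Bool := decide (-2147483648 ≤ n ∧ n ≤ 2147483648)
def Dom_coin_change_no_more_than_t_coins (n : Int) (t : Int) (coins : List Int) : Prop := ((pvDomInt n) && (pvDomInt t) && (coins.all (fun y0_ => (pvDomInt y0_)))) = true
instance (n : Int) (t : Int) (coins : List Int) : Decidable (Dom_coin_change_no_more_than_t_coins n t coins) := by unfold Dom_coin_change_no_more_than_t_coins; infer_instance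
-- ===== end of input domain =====

-- B replaces A's 2D at-most-j table by a rolling 1D exactly-k-coins layer with a running
-- accumulator (alternative decomposition, O(n) space); equivalence proved on Pre_, with the
-- single stated intended difference D_ (A's negative-index wraparound corner).

-- ===== PORT A =====
-- dp[i][j] read with Python index semantics (negative index wraps; none = IndexError is
-- excluded by Pre_, 0 returned there keeps the port total)
def pvDpGet (dp : List (List Int)) (i j : Int) : Int :=
  match PySem.List.pyGet? dp i with
  | some row => (PySem.List.pyGet? row j).getD 0
  | none => 0

-- dp[i][j] = v; all of A's writes use loop indices i, j ≥ 0, where .toNat is exact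
def pvDpSet (dp : List (List Int)) (i j : Int) (v : Int) : List (List Int) :=
  dp.set i.toNat ((dp.getD i.toNat []).set j.toNat v)

def coin_change_no_more_than_t_coins (n : Int) (t : Int) (coins : List Int) : Int :=
  let dp := (PySem.List.pyRange 0 (n+1) 1).map (fun _ => List.replicate (t+1).toNat 0)
  let dp := pvDpSet dp 0 0 1
  let dp := (PySem.List.pyRange 0 (n+1) 1).foldl (fun dp i =>
    (PySem.List.pyRange 0 (t+1) 1).foldl (fun dp j =>
      if i > 0 ∧ j = 0 then pvDpSet dp i j 0
      else if i = 0 ∧ j > 0 then pvDpSet dp i j 1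
      else coins.foldl (fun dp coin =>
        if i - coin ≥ 0 then pvDpSet dp i j (pvDpGet dp i j + pvDpGet dp (i - coin) (j - 1))
        else dp) dp) dp) dp
  pvDpGet dp n t

-- ===== PORT B =====
def coin_change_no_more_than_t_coins_alt (n : Int) (t : Int) (coins : List Int) : Int :=
  let L := (List.replicate (n+1).toNat 0).set 0 1
  let answer := (PySem.List.pyGet? L n).getD 0
  let res := (PySem.List.pyRange 0 t 1).foldl (fun (st : Int × List Int) _ =>
    let new := (PySem.List.pyRange 1 (n+1) 1).foldl (fun new i =>
      new.set i.toNat (coins.foldl (fun s coin =>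
        if i - coin ≥ 0 then s + (PySem.List.pyGet? st.2 (i - coin)).getD 0 else s) 0))
      (List.replicate (n+1).toNat 0)
    (st.1 + (PySem.List.pyGet? new n).getD 0, new)) (answer, L)
  res.1

-- ===== PRECONDITION & SPEC =====
-- Pre_ excludes exactly the inputs where A raises IndexError: negative n or t (empty table
-- rows/columns), and a negative coin that is ever used as a row index past the table
-- (any negative coin when t ≥ 1; a coin < -n when t = 0).
def Pre_coin_change_no_more_than_t_coins (n : Int) (t : Int) (coins : List Int) : Prop :=
  0 ≤ n ∧ 0 ≤ t ∧ ∀ c ∈ coins, 0 ≤ c ∨ (t = 0 ∧ -c ≤ n)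
instance (n : Int) (t : Int) (coins : List Int) : Decidable (Pre_coin_change_no_more_than_t_coins n t coins) := by unfold Pre_coin_change_no_more_than_t_coins; infer_instance
def pvWitness_coin_change_no_more_than_t_coins : Int × Int × List Int := (4, 3, [1, 2])

-- On n = 0, t = 0 with 0 ∈ coins, A's dp[0][-1] wraps onto dp[0][0] itself and doubles it once
-- per zero coin, so A returns 2^(count of zero coins); B returns the intended 1 (the empty
-- sequence is the only sequence of at most 0 coins summing to 0).
def D_coin_change_no_more_than_t_coins (n : Int) (t : Int) (coins : List Int) : Prop :=
  n = 0 ∧ t = 0 ∧ (0 : Int) ∈ coins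
instance (n : Int) (t : Int) (coins : List Int) : Decidable (D_coin_change_no_more_than_t_coins n t coins) := by unfold D_coin_change_no_more_than_t_coins; infer_instance

def Spec_coin_change_no_more_than_t_coins (n : Int) (t : Int) (coins : List Int) (out : Int) : Prop := ¬ D_coin_change_no_more_than_t_coins n t coins → out = coin_change_no_more_than_t_coins_alt n t coins
instance (n : Int) (t : Int) (coins : List Int) (out : Int) : Decidable (Spec_coin_change_no_more_than_t_coins n t coins out) := by unfold Spec_coin_change_no_more_than_t_coins; infer_instance

def pvDiffWitness_coin_change_no_more_than_t_coins : Int × Int × List Int := (0, 0, [0])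
def pvDiffWitnessOut_coin_change_no_more_than_t_coins : Int × Int := (2, 1)

-- ===== CLAIM (what is proved, stated in full; the proofs are below) =====
def Claim_unchanged_coin_change_no_more_than_t_coins : Prop := ∀ (n : Int) (t : Int) (coins : List Int), Dom_coin_change_no_more_than_t_coins n t coins → Pre_coin_change_no_more_than_t_coins n t coins → Spec_coin_change_no_more_than_t_coins n t coins (coin_change_no_more_than_t_coins n t coins)
def Claim_changed_coin_change_no_more_than_t_coins : Prop := Dom_coin_change_no_more_than_t_coins (pvDiffWitness_coin_change_no_more_than_t_coins.1) (pvDiffWitness_coin_change_no_more_than_t_coins.2.1) (pvDiffWitness_coin_change_no_more_than_t_coins.2.2) ∧ Pre_coin_change_no_more_than_t_coins (pvDiffWitness_coin_change_no_more_than_t_coins.1) (pvDiffWitness_coin_change_no_more_than_t_coins.2.1) (pvDiffWitness_coin_change_no_more_than_t_coins.2.2) ∧ D_coin_change_no_more_than_t_coins (pvDiffWitness_coin_change_no_more_than_t_coins.1) (pvDiffWitness_coin_change_no_more_than_t_coins.2.1) (pvDiffWitness_coin_change_no_more_than_t_coins.2.2) ∧ coin_change_no_more_than_t_coins (pvDiffWitness_coin_change_no_more_than_t_coins.1)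 (pvDiffWitness_coin_change_no_more_than_t_coins.2.1) (pvDiffWitness_coin_change_no_more_than_t_coins.2.2) = pvDiffWitnessOut_coin_change_no_more_than_t_coins.1 ∧ coin_change_no_more_than_t_coins_alt (pvDiffWitness_coin_change_no_more_than_t_coins.1) (pvDiffWitness_coin_change_no_more_than_t_coins.2.1) (pvDiffWitness_coin_change_no_more_than_t_coins.2.2) = pvDiffWitnessOut_coin_change_no_more_than_t_coins.2 ∧ pvDiffWitnessOut_coin_change_no_more_than_t_coins.1 ≠ pvDiffWitnessOut_coin_change_no_more_than_t_coins.2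
def Claim_exact_coin_change_no_more_than_t_coins : Prop := ∀ (n : Int) (t : Int) (coins : List Int), Dom_coin_change_no_more_than_t_coins n t coins → Pre_coin_change_no_more_than_t_coins n t coins → D_coin_change_no_more_than_t_coins n t coins → coin_change_no_more_than_t_coins n t coins ≠ coin_change_no_more_than_t_coins_alt n t coins

-- ===== LEMMAS AND PROOFS =====

-- number of ordered sequences of exactly k coins summing to i (the quantity B's layer holds)
def pvLayer (coins : List Int) : Nat → Int → Int
  | 0, i => if i = 0 then 1 else 0
  | k+1, i => if 1 ≤ i then
      coins.foldl (fun s c => if i - c ≥ 0 then s + pvLayer coins k (i - c) else s) 0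
    else 0

-- Σ_{k ≤ j} pvLayer k i  (the value A's finished table holds at dp[i][j])
def pvAcc (coins : List Int) : Nat → Int → Int
  | 0, i => pvLayer coins 0 i
  | j+1, i => pvAcc coins j i + pvLayer coins (j+1) i

def pvDims (dp : List (List Int)) (N T : Nat) : Prop :=
  dp.length = N + 1 ∧ ∀ (r : Nat) (h : r < dp.length), (dp[r]).length = T + 1

def gg (dp : List (List Int)) (r c : Nat) : Int := pvDpGet dp (r : Int) (c : Int)

def gl (L : List Int) (i : Nat) : Int := (PySem.List.pyGet? L (i : Int)).getD 0

lemma pvRangeFoldInv {St : Type} (f : St → Int → St) (Q : Int → St → Prop) :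
    ∀ (k : Nat) (a : Int) (s : St),
      (∀ i s', a ≤ i → i < a + k → Q i s' → Q (i+1) (f s' i)) → Q a s →
      Q (a + k) ((PySem.List.pyRange a (a + (k : Int)) 1).foldl f s) := by
  intro k
  induction k with
  | zero =>
    intro a s _ h
    simpa [PySem.List.pyRange_one_eq_nil (by push_cast; omega : a + ((0:Nat):Int) ≤ a)] using h
  | succ m ih =>
    intro a s hstep h
    rw [PySem.List.pyRange_one_cons (by push_cast; omega : a < a + ((m+1 : Nat) : Int))]
    simp only [List.foldl_cons]
    have h2 := ih (a+1) (f s a)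
      (fun i s' hi1 hi2 hq => hstep i s' (by omega) (by push_cast at hi2 ⊢; omega) hq)
      (hstep a s le_rfl (by push_cast; omega) h)
    have e : a + ((m+1:Nat) : Int) = (a+1) + (m : Int) := by push_cast; ring
    rw [e]
    convert h2 using 3

lemma pvRangeFoldInv' {St : Type} (f : St → Int → St) (Q : Int → St → Prop) (a b : Int)
    (hab : a ≤ b) (step : ∀ i s', a ≤ i → i < b → Q i s' → Q (i+1) (f s' i)) (s : St)
    (h : Q a s) : Q b ((PySem.List.pyRange a b 1).foldl f s) := by
  have h2 := pvRangeFoldInv f Q (b - a).toNat a s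
    (fun i s' h1 hlt hq => step i s' h1 (by omega) hq) h
  have e : a + (((b - a).toNat : Nat) : Int) = b := by omega
  rw [e] at h2
  exact h2

lemma gg_eq (dp : List (List Int)) (r c : Nat) (hr : r < dp.length)
    (hc : c < (dp[r]).length) : gg dp r c = dp[r][c] := by
  unfold gg pvDpGet
  rw [PySem.List.pyGet?_natCast, List.getElem?_eq_getElem hr]
  simp [PySem.List.pyGet?_natCast, List.getElem?_eq_getElem hc]

lemma gl_eq (L : List Int) (i : Nat) (hi : i < L.length) : gl L i = L[i] := by
  unfold gl
  rw [PySem.List.pyGet?_natCast, List.getElem?_eq_getElem hi]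
  rfl

lemma pvDpSet_natCast (dp : List (List Int)) (r c : Nat) (v : Int) :
    pvDpSet dp (r : Int) (c : Int) v = dp.set r ((dp.getD r []).set c v) := by
  simp [pvDpSet]

lemma pvDims_set (dp : List (List Int)) (N T : Nat) (hd : pvDims dp N T) (r : Nat) (c : Nat)
    (hr : r ≤ N) (v : Int) : pvDims (pvDpSet dp (r : Int) (c : Int) v) N T := by
  obtain ⟨hlen, hrow⟩ := hd
  rw [pvDpSet_natCast]
  refine ⟨by simpa using hlen, ?_⟩
  intro k hk
  have hk' : k < dp.length := by simpa using hk
  rw [List.getElem_set]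
  split_ifs with h
  · rw [List.getD_eq_getElem _ _ (show r < dp.length by omega)]
    simp [hrow r (show r < dp.length by omega)]
  · exact hrow k hk'

lemma gg_set (dp : List (List Int)) (N T : Nat) (hd : pvDims dp N T) (r c : Nat)
    (hr : r ≤ N) (_hc : c ≤ T) (v : Int) (r' c' : Nat) (hr' : r' ≤ N) (hc' : c' ≤ T) :
    gg (pvDpSet dp (r : Int) (c : Int) v) r' c' = if r' = r ∧ c' = c then v else gg dp r' c' := by
  obtain ⟨hlen, hrow⟩ := hd
  have hr1 : r < dp.length := by omega
  have hr'1 : r' < dp.length := by omega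
  rw [pvDpSet_natCast, List.getD_eq_getElem _ _ hr1]
  have hset : (dp.set r ((dp[r]).set c v)).length = dp.length := by simp
  have h1 : r' < (dp.set r ((dp[r]).set c v)).length := by omega
  have hrowlen : ∀ (k : Nat) (h : k < dp.length), (dp[k]).length = T + 1 := hrow
  rw [gg_eq _ r' c' h1 (by
    rw [List.getElem_set]
    split_ifs with h
    · simp only [List.length_set, hrowlen r hr1]; omega
    · rw [hrowlen r' hr'1]; omega)]
  by_cases h : r = r'
  · subst h
    rw [gg_eq dp r c' hr1 (by rw [hrowlen r hr1]; omega)]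
    by_cases h2 : c = c'
    · subst h2; simp
    · have h3 : ¬ c' = c := fun hh => h2 hh.symm
      simp [h2, h3]
  · have h3 : ¬ (r' = r ∧ c' = c) := by tauto
    rw [gg_eq dp r' c' hr'1 (by rw [hrowlen r' hr'1]; omega)]
    simp [h, h3]

lemma gg_neg1 (dp : List (List Int)) (N T : Nat) (hd : pvDims dp N T) (r : Nat) (hr : r ≤ N) :
    pvDpGet dp (r : Int) (-1) = gg dp r T := by
  obtain ⟨hlen, hrow⟩ := hd
  have hr1 : r < dp.length := by omega
  have hT : T < (dp[r]).length := by rw [hrow r hr1]; omega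
  unfold pvDpGet
  rw [PySem.List.pyGet?_natCast, List.getElem?_eq_getElem hr1]
  show (PySem.List.pyGet? dp[r] (-1)).getD 0 = gg dp r T
  rw [PySem.List.pyGet?_neg_one, List.getLast?_eq_getElem?]
  rw [gg_eq dp r T hr1 hT]
  have h2 : (dp[r]).length - 1 = T := by rw [hrow r hr1]; omega
  rw [h2, List.getElem?_eq_getElem hT]
  rfl

lemma pvFoldlSum (l : List Int) (P : Int → Prop) [DecidablePred P] (f : Int → Int) (init : Int) :
    l.foldl (fun s c => if P c then s + f c else s) init
      = init + ((l.filter (fun c => decide (P c))).map f).sum := by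
  induction l generalizing init with
  | nil => simp
  | cons c l ih =>
    by_cases h : P c
    · rw [List.foldl_cons, if_pos h, ih,
        List.filter_cons_of_pos (by simpa using h), List.map_cons, List.sum_cons]
      ring
    · rw [List.foldl_cons, if_neg h, ih, List.filter_cons_of_neg (by simpa using h)]

lemma pvAcc_zero (coins : List Int) (j : Nat) : pvAcc coins j 0 = 1 := by
  induction j with
  | zero => simp [pvAcc, pvLayer]
  | succ j ih => simp [pvAcc, pvLayer, ih]

lemma pvLayer_nonpos (coins : List Int) (k : Nat) (i : Int) (hi : ¬ 1 ≤ i) (hk : 1 ≤ k) :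
    pvLayer coins k i = 0 := by
  cases k with
  | zero => omega
  | succ k => simp [pvLayer, hi]

lemma pvAcc_rec (coins : List Int) (i : Int) (hi : 1 ≤ i) (j : Nat) :
    ((coins.filter (fun c => decide (i - c ≥ 0))).map (fun c => pvAcc coins j (i - c))).sum
      = pvAcc coins (j+1) i := by
  induction j with
  | zero =>
    have h0 : pvLayer coins 0 i = 0 := by simp [pvLayer]; omega
    show _ = pvAcc coins 1 i
    simp only [pvAcc, h0, zero_add]
    rw [show pvLayer coins 1 i = coins.foldl
        (fun s c => if i - c ≥ 0 then s + pvLayer coins 0 (i - c) else s) 0 by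
      simp [pvLayer, hi]]
    rw [pvFoldlSum coins (fun c => i - c ≥ 0) (fun c => pvLayer coins 0 (i - c)) 0]
    simp
  | succ j ih =>
    show _ = pvAcc coins (j+2) i
    have e1 : ∀ c : Int, pvAcc coins (j+1) (i - c)
        = pvAcc coins j (i - c) + pvLayer coins (j+1) (i - c) := fun c => rfl
    calc ((coins.filter (fun c => decide (i - c ≥ 0))).map
            (fun c => pvAcc coins (j+1) (i - c))).sum
        = ((coins.filter (fun c => decide (i - c ≥ 0))).map
            (fun c => pvAcc coins j (i - c))).sum
          + ((coins.filter (fun c => decide (i - c ≥ 0))).map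
            (fun c => pvLayer coins (j+1) (i - c))).sum := by
          rw [← List.sum_map_add]
          exact congrArg List.sum (List.map_congr_left (fun c _ => e1 c))
      _ = pvAcc coins (j+1) i + pvLayer coins (j+2) i := by
          rw [ih]
          congr 1
          rw [show pvLayer coins (j+2) i = coins.foldl
              (fun s c => if i - c ≥ 0 then s + pvLayer coins (j+1) (i - c) else s) 0 by
            simp [pvLayer, hi]]
          rw [pvFoldlSum coins (fun c => i - c ≥ 0)
            (fun c => pvLayer coins (j+1) (i - c)) 0]
          simp
      _ = pvAcc coins (j+2) i := rfl

-- the coin loop at an interior cell (r, jc), r ≥ 1, jc ≥ 1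
lemma pvCoinFoldA (N T r jc : Nat) (hr : r ≤ N) (hjc : jc ≤ T) (h1 : 1 ≤ jc) :
    ∀ (l : List Int) (dp : List (List Int)), pvDims dp N T → (∀ c ∈ l, 0 ≤ c) →
      pvDims (l.foldl (fun dp c =>
        if (r : Int) - c ≥ 0 then
          pvDpSet dp (r : Int) (jc : Int)
            (pvDpGet dp (r : Int) (jc : Int) + pvDpGet dp ((r : Int) - c) ((jc : Int) - 1))
        else dp) dp) N T ∧
      ∀ r' ≤ N, ∀ c' ≤ T, gg (l.foldl (fun dp c =>
        if (r : Int) - c ≥ 0 then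
          pvDpSet dp (r : Int) (jc : Int)
            (pvDpGet dp (r : Int) (jc : Int) + pvDpGet dp ((r : Int) - c) ((jc : Int) - 1))
        else dp) dp) r' c' =
        if r' = r ∧ c' = jc then
          gg dp r jc + ((l.filter (fun c => decide ((r : Int) - c ≥ 0))).map
            (fun c => gg dp ((r : Int) - c).toNat (jc - 1))).sum
        else gg dp r' c' := by
  intro l
  induction l with
  | nil =>
    intro dp hd _
    refine ⟨hd, ?_⟩
    intro r' hr' c' hc'
    simp only [List.foldl_nil, List.filter_nil, List.map_nil, List.sum_nil, add_zero]
    split_ifs with hit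
    · obtain ⟨rfl, rfl⟩ := hit; rfl
    · rfl
  | cons c l ih =>
    intro dp hd hl
    have hc0 : (0:Int) ≤ c := hl c (by simp)
    simp only [List.foldl_cons]
    by_cases hg : (r : Int) - c ≥ 0
    · rw [if_pos hg]
      have hcast : ((((r : Int) - c).toNat : Nat) : Int) = (r : Int) - c := by omega
      have hread : pvDpGet dp ((r : Int) - c) ((jc : Int) - 1)
          = gg dp ((r : Int) - c).toNat (jc - 1) := by
        unfold gg
        rw [hcast, (by omega : (((jc - 1 : Nat)) : Int) = (jc : Int) - 1)]
      have hdp1 : pvDpSet dp (r : Int) (jc : Int)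
            (pvDpGet dp (r : Int) (jc : Int) + pvDpGet dp ((r : Int) - c) ((jc : Int) - 1))
          = pvDpSet dp (r : Int) (jc : Int)
            (gg dp r jc + gg dp ((r : Int) - c).toNat (jc - 1)) := by
        rw [hread]; rfl
      rw [hdp1]
      set w := gg dp ((r : Int) - c).toNat (jc - 1) with hw
      set dp1 := pvDpSet dp (r : Int) (jc : Int) (gg dp r jc + w) with hdp1e
      have hd1 : pvDims dp1 N T := pvDims_set dp N T hd r jc hr _
      obtain ⟨ihd, ihg⟩ := ih dp1 hd1 (fun x hx => hl x (by simp [hx]))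
      refine ⟨ihd, ?_⟩
      intro r' hr' c' hc'
      rw [ihg r' hr' c' hc']
      have hset := gg_set dp N T hd r jc hr hjc (gg dp r jc + w)
      rw [← hdp1e] at hset
      have hfil : (c :: l).filter (fun c => decide ((r : Int) - c ≥ 0))
          = c :: l.filter (fun c => decide ((r : Int) - c ≥ 0)) :=
        List.filter_cons_of_pos (by simpa using hg)
      have hsum : (l.filter (fun c => decide ((r : Int) - c ≥ 0))).map
            (fun c => gg dp1 ((r : Int) - c).toNat (jc - 1))
          = (l.filter (fun c => decide ((r : Int) - c ≥ 0))).map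
            (fun c => gg dp ((r : Int) - c).toNat (jc - 1)) := by
        apply List.map_congr_left
        intro x hx
        have hxl : x ∈ l := (List.mem_filter.mp hx).1
        have hxg : (r : Int) - x ≥ 0 := by simpa using (List.mem_filter.mp hx).2
        have hx0 : (0:Int) ≤ x := hl x (by simp [hxl])
        rw [hset (((r : Int) - x).toNat) (jc - 1) (by omega) (by omega)]
        rw [if_neg (by rintro ⟨_, h2⟩; omega)]
      split_ifs with hit
      · rw [hset r jc hr hjc, if_pos ⟨rfl, rfl⟩, hfil,
          List.map_cons, List.sum_cons, hsum]
        ring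
      · rw [hset r' c' hr' hc', if_neg hit]
    · rw [if_neg hg]
      obtain ⟨ihd, ihg⟩ := ih dp hd (fun x hx => hl x (by simp [hx]))
      refine ⟨ihd, ?_⟩
      intro r' hr' c' hc'
      rw [ihg r' hr' c' hc',
        List.filter_cons_of_neg (by simpa using hg)]

-- the coin loop at cell (0,0) when T ≥ 1 and coins are nonnegative: a no-op pointwise
lemma pvCoinFold00 (N T : Nat) (hT : 1 ≤ T) :
    ∀ (l : List Int) (dp : List (List Int)), pvDims dp N T → (∀ c ∈ l, 0 ≤ c) →
      gg dp 0 T = 0 →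
      pvDims (l.foldl (fun dp c =>
        if (0 : Int) - c ≥ 0 then
          pvDpSet dp (0 : Int) (0 : Int)
            (pvDpGet dp (0 : Int) (0 : Int) + pvDpGet dp ((0 : Int) - c) ((0 : Int) - 1))
        else dp) dp) N T ∧
      ∀ r' ≤ N, ∀ c' ≤ T, gg (l.foldl (fun dp c =>
        if (0 : Int) - c ≥ 0 then
          pvDpSet dp (0 : Int) (0 : Int)
            (pvDpGet dp (0 : Int) (0 : Int) + pvDpGet dp ((0 : Int) - c) ((0 : Int) - 1))
        else dp) dp) r' c' = gg dp r' c' := by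
  intro l
  induction l with
  | nil => intro dp hd _ _; exact ⟨hd, fun _ _ _ _ => rfl⟩
  | cons c l ih =>
    intro dp hd hl hT0
    have hc0 : (0:Int) ≤ c := hl c (by simp)
    simp only [List.foldl_cons]
    by_cases hg : (0 : Int) - c ≥ 0
    · have hcz : c = 0 := by omega
      subst hcz
      rw [if_pos hg]
      have hneg := gg_neg1 dp N T hd 0 (by omega)
      simp only [Nat.cast_zero] at hneg
      have h00 : pvDpGet dp (0 : Int) (0 : Int) = gg dp 0 0 := by
        unfold gg; norm_num
      have hval : pvDpSet dp (0 : Int) (0 : Int)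
            (pvDpGet dp (0 : Int) (0 : Int) + pvDpGet dp ((0 : Int) - 0) ((0 : Int) - 1))
          = pvDpSet dp (0 : Int) (0 : Int) (gg dp 0 0) := by
        rw [show ((0 : Int) - 0) = (0 : Int) by norm_num,
          show ((0 : Int) - 1) = (-1 : Int) by norm_num, hneg, hT0, h00, add_zero]
      rw [hval]
      have hset := gg_set dp N T hd 0 0 (by omega) (by omega) (gg dp 0 0)
      simp only [Nat.cast_zero] at hset
      have hd1 : pvDims (pvDpSet dp (0 : Int) (0 : Int) (gg dp 0 0)) N T := by
        have := pvDims_set dp N T hd 0 0 (by omega) (gg dp 0 0)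
        simpa using this
      have hsame : ∀ r' ≤ N, ∀ c' ≤ T,
          gg (pvDpSet dp (0 : Int) (0 : Int) (gg dp 0 0)) r' c' = gg dp r' c' := by
        intro r' hr' c' hc'
        rw [hset r' c' hr' hc']
        split_ifs with hit
        · rw [hit.1, hit.2]
        · rfl
      obtain ⟨ihd, ihg⟩ := ih _ hd1 (fun x hx => hl x (by simp [hx]))
        (by rw [hsame 0 (by omega) T le_rfl]; exact hT0)
      refine ⟨ihd, ?_⟩
      intro r' hr' c' hc'
      rw [ihg r' hr' c' hc', hsame r' hr' c' hc']
    · rw [if_neg hg]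
      exact ih dp hd (fun x hx => hl x (by simp [hx])) hT0

-- the coin loop at cell (0,0), arbitrary coins: only cell (0,0) can change
lemma pvCoinFold00' (N T : Nat) :
    ∀ (l : List Int) (dp : List (List Int)), pvDims dp N T →
      pvDims (l.foldl (fun dp c =>
        if (0 : Int) - c ≥ 0 then
          pvDpSet dp (0 : Int) (0 : Int)
            (pvDpGet dp (0 : Int) (0 : Int) + pvDpGet dp ((0 : Int) - c) ((0 : Int) - 1))
        else dp) dp) N T ∧
      ∀ r' ≤ N, ∀ c' ≤ T, ¬ (r' = 0 ∧ c' = 0) → gg (l.foldl (fun dp c =>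
        if (0 : Int) - c ≥ 0 then
          pvDpSet dp (0 : Int) (0 : Int)
            (pvDpGet dp (0 : Int) (0 : Int) + pvDpGet dp ((0 : Int) - c) ((0 : Int) - 1))
        else dp) dp) r' c' = gg dp r' c' := by
  intro l
  induction l with
  | nil => intro dp hd; exact ⟨hd, fun _ _ _ _ _ => rfl⟩
  | cons c l ih =>
    intro dp hd
    simp only [List.foldl_cons]
    by_cases hg : (0 : Int) - c ≥ 0
    · rw [if_pos hg]
      set v := pvDpGet dp (0 : Int) (0 : Int) + pvDpGet dp ((0 : Int) - c) ((0 : Int) - 1) with hv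
      have hd1 : pvDims (pvDpSet dp (0 : Int) (0 : Int) v) N T := by
        have := pvDims_set dp N T hd 0 0 (by omega) v
        simpa using this
      have hset := gg_set dp N T hd 0 0 (by omega) (by omega) v
      simp only [Nat.cast_zero] at hset
      obtain ⟨ihd, ihg⟩ := ih _ hd1
      refine ⟨ihd, ?_⟩
      intro r' hr' c' hc' hne
      rw [ihg r' hr' c' hc' hne, hset r' c' hr' hc', if_neg hne]
    · rw [if_neg hg]
      exact ih dp hd

-- positive coins make the (0,0) coin loop literally a no-op
lemma pvCoinFoldNoop (l : List Int) (hl : ∀ c ∈ l, 1 ≤ c) (dp : List (List Int)) :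
    l.foldl (fun dp c =>
      if (0 : Int) - c ≥ 0 then
        pvDpSet dp (0 : Int) (0 : Int)
          (pvDpGet dp (0 : Int) (0 : Int) + pvDpGet dp ((0 : Int) - c) ((0 : Int) - 1))
      else dp) dp = dp := by
  induction l with
  | nil => rfl
  | cons c l ih =>
    have hc1 : (1:Int) ≤ c := hl c (by simp)
    simp only [List.foldl_cons, if_neg (by omega : ¬ ((0 : Int) - c ≥ 0))]
    exact ih (fun x hx => hl x (by simp [hx]))

-- the 1×1-table coin loop: each zero coin doubles the single cell
lemma pvCoinFoldDouble (l : List Int) (hl : ∀ c ∈ l, 0 ≤ c) (v : Int) :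
    l.foldl (fun dp c =>
      if (0 : Int) - c ≥ 0 then
        pvDpSet dp (0 : Int) (0 : Int)
          (pvDpGet dp (0 : Int) (0 : Int) + pvDpGet dp ((0 : Int) - c) ((0 : Int) - 1))
      else dp) [[v]] = [[v * 2 ^ (l.count 0)]] := by
  induction l generalizing v with
  | nil => simp
  | cons c l ih =>
    have hc0 : (0:Int) ≤ c := hl c (by simp)
    simp only [List.foldl_cons]
    by_cases hg : (0 : Int) - c ≥ 0
    · have hcz : c = 0 := by omega
      subst hcz
      rw [if_pos hg]
      have hstep : pvDpSet [[v]] (0 : Int) (0 : Int)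
            (pvDpGet [[v]] (0 : Int) (0 : Int) + pvDpGet [[v]] ((0 : Int) - 0) ((0 : Int) - 1))
          = [[v + v]] := by
        simp [pvDpSet, pvDpGet, PySem.List.pyGet?_neg_one]
      rw [hstep, ih (fun x hx => hl x (by simp [hx])) (v + v)]
      have : (v + v) * 2 ^ (l.count 0) = v * 2 ^ ((0 :: l).count 0) := by
        rw [List.count_cons]
        simp [pow_succ]
        ring
      rw [this]
    · have hc1 : (1:Int) ≤ c := by omega
      rw [if_neg hg, ih (fun x hx => hl x (by simp [hx])) v]
      congr 3
      rw [List.count_cons, if_neg (by simpa using (by omega : ¬ c = 0)), add_zero]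

lemma pvA_val (N T : Nat) (hT : 1 ≤ T) (coins : List Int) (hc : ∀ c ∈ coins, 0 ≤ c) :
    coin_change_no_more_than_t_coins (N : Int) (T : Int) coins = pvAcc coins T (N : Int) := by
  rw [show coin_change_no_more_than_t_coins (N : Int) (T : Int) coins
      = pvDpGet ((PySem.List.pyRange 0 (((N : Nat) : Int)+1) 1).foldl (fun dp i =>
          (PySem.List.pyRange 0 (((T : Nat) : Int)+1) 1).foldl (fun dp j =>
            if i > 0 ∧ j = 0 then pvDpSet dp i j 0
            else if i = 0 ∧ j > 0 then pvDpSet dp i j 1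
            else coins.foldl (fun dp coin =>
              if i - coin ≥ 0 then
                pvDpSet dp i j (pvDpGet dp i j + pvDpGet dp (i - coin) (j - 1))
              else dp) dp) dp)
          (pvDpSet ((PySem.List.pyRange 0 (((N : Nat) : Int)+1) 1).map
            (fun _ => List.replicate (((T : Nat) : Int)+1).toNat 0)) 0 0 1))
        ((N : Nat) : Int) ((T : Nat) : Int) from rfl]
  set DP0 : List (List Int) := (PySem.List.pyRange 0 (((N : Nat) : Int)+1) 1).map
    (fun _ => List.replicate (((T : Nat) : Int)+1).toNat 0) with hDP0
  have hdims0 : pvDims DP0 N T := by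
    constructor
    · simp [hDP0, PySem.List.length_pyRange_one]
      try omega
    · intro r hr
      simp [hDP0]
      try omega
  have hgg0 : ∀ r ≤ N, ∀ c ≤ T, gg DP0 r c = 0 := by
    intro r hr c hc'
    have hrl : r < DP0.length := by rw [hdims0.1]; omega
    rw [gg_eq DP0 r c hrl (by rw [hdims0.2 r hrl]; omega)]
    simp [hDP0]
  have hdims1 : pvDims (pvDpSet DP0 0 0 1) N T := by
    have := pvDims_set DP0 N T hdims0 0 0 (by omega) 1
    simpa using this
  have hgg1 : ∀ r ≤ N, ∀ c ≤ T, gg (pvDpSet DP0 0 0 1) r c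
      = if r = 0 ∧ c = 0 then 1 else 0 := by
    intro r hr c hc'
    have := gg_set DP0 N T hdims0 0 0 (by omega) (by omega) 1 r c hr hc'
    simp only [Nat.cast_zero] at this
    rw [this]
    split_ifs with h1
    · rfl
    · exact hgg0 r hr c hc'
  set OutI : Int → List (List Int) → Prop := fun ii dp => 0 ≤ ii ∧ pvDims dp N T ∧
    ∀ r ≤ N, ∀ c ≤ T, gg dp r c = if (r : Int) < ii then pvAcc coins c (r : Int)
      else if r = 0 ∧ c = 0 then 1 else 0 with hOutI
  have hinit : OutI 0 (pvDpSet DP0 0 0 1) := by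
    refine ⟨le_rfl, hdims1, ?_⟩
    intro r hr c hc'
    rw [hgg1 r hr c hc', if_neg (show ¬ ((r : Int) < 0) by omega)]
  have hstep : ∀ ii dp, (0:Int) ≤ ii → ii < ((N : Nat) : Int) + 1 → OutI ii dp →
      OutI (ii+1) ((fun dp i =>
        (PySem.List.pyRange 0 (((T : Nat) : Int)+1) 1).foldl (fun dp j =>
          if i > 0 ∧ j = 0 then pvDpSet dp i j 0
          else if i = 0 ∧ j > 0 then pvDpSet dp i j 1
          else coins.foldl (fun dp coin =>
            if i - coin ≥ 0 then
              pvDpSet dp i j (pvDpGet dp i j + pvDpGet dp (i - coin) (j - 1))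
            else dp) dp) dp) dp ii) := by
    intro ii dp h0 hlt hq
    obtain ⟨r, rfl⟩ : ∃ r : Nat, ii = ((r : Nat) : Int) := ⟨ii.toNat, by omega⟩
    obtain ⟨-, hdp, hval⟩ := hq
    have hrN : r ≤ N := by omega
    simp only []
    set InI : Int → List (List Int) → Prop := fun jj dp' => 0 ≤ jj ∧ pvDims dp' N T ∧
      ∀ r' ≤ N, ∀ c' ≤ T, gg dp' r' c' = if (r' : Int) < (r : Int) then pvAcc coins c' (r' : Int)
        else if r' = r ∧ (c' : Int) < jj then pvAcc coins c' (r' : Int)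
        else if r' = 0 ∧ c' = 0 then 1 else 0 with hInI
    have hibase : InI 0 dp := by
      refine ⟨le_rfl, hdp, ?_⟩
      intro r' hr' c' hc'
      rw [hval r' hr' c' hc']
      by_cases h : (r' : Int) < (r : Int)
      · rw [if_pos h, if_pos h]
      · rw [if_neg h, if_neg h, if_neg (show ¬ (r' = r ∧ (c' : Int) < 0) by omega)]
    have histep : ∀ jj dp', (0:Int) ≤ jj → jj < ((T : Nat) : Int) + 1 → InI jj dp' →
        InI (jj+1) ((fun dp j =>
          if ((r : Nat) : Int) > 0 ∧ j = 0 then pvDpSet dp ((r : Nat) : Int) j 0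
          else if ((r : Nat) : Int) = 0 ∧ j > 0 then pvDpSet dp ((r : Nat) : Int) j 1
          else coins.foldl (fun dp coin =>
            if ((r : Nat) : Int) - coin ≥ 0 then
              pvDpSet dp ((r : Nat) : Int) j
                (pvDpGet dp ((r : Nat) : Int) j + pvDpGet dp (((r : Nat) : Int) - coin) (j - 1))
            else dp) dp) dp' jj) := by
      intro jj dp' hj0 hjlt hr'
      obtain ⟨jc, rfl⟩ : ∃ jc : Nat, jj = ((jc : Nat) : Int) := ⟨jj.toNat, by omega⟩
      obtain ⟨-, hdp', hval'⟩ := hr'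
      have hjcT : jc ≤ T := by omega
      simp only []
      by_cases hr0 : r = 0
      · subst hr0
        by_cases hjc0 : jc = 0
        · -- cell (0,0): the coin loop, a pointwise no-op since dp'[0][T] = 0
          subst hjc0
          rw [if_neg (by simp), if_neg (by simp)]
          have hT0 : gg dp' 0 T = 0 := by
            rw [hval' 0 (by omega) T le_rfl, if_neg (by omega), if_neg (by omega),
              if_neg (by omega)]
          have hcf := pvCoinFold00 N T hT coins dp' hdp' hc hT0
          -- align the fold function: ↑(0:Nat) = (0:Int)
          simp only [Nat.cast_zero] at hval' ⊢
          obtain ⟨hcfd, hcfv⟩ := hcf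
          refine ⟨by omega, hcfd, ?_⟩
          intro r' hr' c' hc'
          rw [hcfv r' hr' c' hc', hval' r' hr' c' hc']
          simp only [Nat.cast_zero]
          rw [if_neg (show ¬ ((r' : Int) < 0) by omega),
            if_neg (show ¬ ((r' : Int) < 0) by omega),
            if_neg (show ¬ (r' = 0 ∧ (c' : Int) < 0) by omega)]
          by_cases hb : r' = 0 ∧ (c' : Int) < 0 + 1
          · have hr0' : r' = 0 := hb.1
            have hc0' : c' = 0 := by omega
            subst hr0'; subst hc0'
            rw [if_pos hb, if_pos ⟨rfl, rfl⟩]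
            simp [pvAcc_zero]
          · rw [if_neg hb]
        · -- cell (0, jc), jc ≥ 1: write 1
          rw [if_neg (by omega), if_pos ⟨by simp, by omega⟩]
          have hset := gg_set dp' N T hdp' 0 jc (by omega) hjcT 1
          refine ⟨by omega, by simpa using pvDims_set dp' N T hdp' 0 jc (by omega) 1, ?_⟩
          intro r' hr' c' hc'
          rw [hset r' c' hr' hc']
          by_cases hhit : r' = 0 ∧ c' = jc
          · rw [if_pos hhit, if_neg (by omega), if_pos (by omega)]
            rw [hhit.1, hhit.2]
            simp [pvAcc_zero]
          · rw [if_neg hhit, hval' r' hr' c' hc']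
            by_cases ha : (r' : Int) < ((0:Nat) : Int)
            · omega
            · rw [if_neg ha, if_neg ha]
              by_cases hb : r' = 0 ∧ (c' : Int) < ((jc : Nat) : Int)
              · rw [if_pos hb, if_pos ⟨hb.1, by omega⟩]
              · rw [if_neg hb, if_neg (show ¬ (r' = 0 ∧ (c' : Int) < ((jc : Nat) : Int) + 1)
                  from by
                    rintro ⟨hx, hy⟩
                    have h5 : ¬ ((c' : Int) < ((jc : Nat) : Int)) := fun h6 => hb ⟨hx, h6⟩
                    exact hhit ⟨hx, by omega⟩)]
      · by_cases hjc0 : jc = 0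
        · -- cell (r, 0), r ≥ 1: write 0
          subst hjc0
          rw [if_pos ⟨by omega, by simp⟩]
          have hset := gg_set dp' N T hdp' r 0 hrN (by omega) 0
          refine ⟨by omega, by simpa using pvDims_set dp' N T hdp' r 0 hrN 0, ?_⟩
          intro r' hr' c' hc'
          rw [hset r' c' hr' hc']
          by_cases hhit : r' = r ∧ c' = 0
          · rw [if_pos hhit, if_neg (by omega), if_pos (by omega)]
            rw [hhit.1, hhit.2]
            rw [show pvAcc coins 0 ((r : Nat) : Int)
                = if ((r : Nat) : Int) = 0 then 1 else 0 from rfl, if_neg (by omega)]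
          · rw [if_neg hhit, hval' r' hr' c' hc']
            by_cases ha : (r' : Int) < (r : Int)
            · rw [if_pos ha, if_pos ha]
            · rw [if_neg ha,
                if_neg (show ¬ (r' = r ∧ (c' : Int) < ((0:Nat) : Int)) from by
                  rintro ⟨-, h6⟩; omega),
                if_neg ha,
                if_neg (show ¬ (r' = r ∧ (c' : Int) < ((0:Nat) : Int) + 1) from by
                  rintro ⟨hx, hy⟩; exact hhit ⟨hx, by omega⟩)]
        · -- cell (r, jc), r ≥ 1, jc ≥ 1: the coin loop accumulates the layer sum
          rw [if_neg (by omega), if_neg (by omega)]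
          have hcf := pvCoinFoldA N T r jc hrN hjcT (by omega) coins dp' hdp' hc
          obtain ⟨hcfd, hcfv⟩ := hcf
          refine ⟨by omega, hcfd, ?_⟩
          intro r' hr' c' hc'
          rw [hcfv r' hr' c' hc']
          by_cases hhit : r' = r ∧ c' = jc
          · rw [if_pos hhit]
            have hcell : gg dp' r jc = 0 := by
              rw [hval' r hrN jc hjcT, if_neg (by omega),
                if_neg (show ¬ (r = r ∧ ((jc : Nat) : Int) < ((jc : Nat) : Int)) from by
                  rintro ⟨-, h6⟩; omega),
                if_neg (show ¬ (r = 0 ∧ jc = 0) from by omega)]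
            have hsum : ((coins.filter (fun c => decide (((r : Nat) : Int) - c ≥ 0))).map
                (fun c => gg dp' (((r : Nat) : Int) - c).toNat (jc - 1))).sum
                = pvAcc coins jc ((r : Nat) : Int) := by
              rw [show ((coins.filter (fun c => decide (((r : Nat) : Int) - c ≥ 0))).map
                  (fun c => gg dp' (((r : Nat) : Int) - c).toNat (jc - 1)))
                  = ((coins.filter (fun c => decide (((r : Nat) : Int) - c ≥ 0))).map
                  (fun c => pvAcc coins (jc - 1) (((r : Nat) : Int) - c))) from ?_]
              · rw [show jc = (jc - 1) + 1 from by omega]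
                exact pvAcc_rec coins ((r : Nat) : Int) (by omega) (jc - 1)
              · apply List.map_congr_left
                intro x hx
                have hxm : x ∈ coins := (List.mem_filter.mp hx).1
                have hxg : ((r : Nat) : Int) - x ≥ 0 := by
                  simpa using (List.mem_filter.mp hx).2
                have hx0 : (0:Int) ≤ x := hc x hxm
                set mx : Nat := (((r : Nat) : Int) - x).toNat with hmx
                have hmxcast : ((mx : Nat) : Int) = ((r : Nat) : Int) - x := by omega
                rw [hval' mx (by omega) (jc - 1) (by omega)]
                by_cases hxz : x = 0
                · rw [if_neg (by omega), if_pos (by constructor <;> omega), hmxcast]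
                · rw [if_pos (by omega), hmxcast]
            rw [hcell, hsum, zero_add, hhit.1, hhit.2, if_neg (by omega), if_pos (by omega)]
          · rw [if_neg hhit, hval' r' hr' c' hc']
            by_cases ha : (r' : Int) < (r : Int)
            · rw [if_pos ha, if_pos ha]
            · rw [if_neg ha, if_neg ha]
              by_cases hb : r' = r ∧ (c' : Int) < ((jc : Nat) : Int)
              · rw [if_pos hb, if_pos ⟨hb.1, by omega⟩]
              · rw [if_neg hb, if_neg (show ¬ (r' = r ∧ (c' : Int) < ((jc : Nat) : Int) + 1)
                  from by
                    rintro ⟨hx, hy⟩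
                    have h5 : ¬ ((c' : Int) < ((jc : Nat) : Int)) := fun h6 => hb ⟨hx, h6⟩
                    exact hhit ⟨hx, by omega⟩)]
    have hinner := pvRangeFoldInv' _ InI 0 (((T : Nat) : Int)+1) (by omega) histep dp hibase
    obtain ⟨-, hdF, hvF⟩ := hinner
    refine ⟨by omega, hdF, ?_⟩
    intro r' hr' c' hc'
    rw [hvF r' hr' c' hc']
    by_cases ha : (r' : Int) < (r : Int)
    · rw [if_pos ha, if_pos (by omega)]
    · by_cases hb : r' = r
      · rw [if_neg ha, if_pos ⟨hb, by omega⟩, if_pos (by omega)]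
      · rw [if_neg ha,
          if_neg (show ¬ (r' = r ∧ (c' : Int) < ((T : Nat) : Int) + 1) from by
            rintro ⟨hx, -⟩; exact hb hx),
          if_neg (show ¬ ((r' : Int) < ((r : Nat) : Int) + 1) from by omega)]
  have hfin := pvRangeFoldInv' _ OutI 0 (((N : Nat) : Int)+1) (by omega) hstep
    (pvDpSet DP0 0 0 1) hinit
  obtain ⟨-, -, hvalF⟩ := hfin
  have := hvalF N le_rfl T le_rfl
  rw [if_pos (by omega)] at this
  exact this

lemma pvA_val0 (N : Nat) (coins : List Int)
    (h0 : N = 0 → ∀ c ∈ coins, 1 ≤ c) :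
    coin_change_no_more_than_t_coins (N : Int) 0 coins = if N = 0 then 1 else 0 := by
  rw [show coin_change_no_more_than_t_coins (N : Int) 0 coins
      = pvDpGet ((PySem.List.pyRange 0 (((N : Nat) : Int)+1) 1).foldl (fun dp i =>
          (PySem.List.pyRange 0 ((0 : Int)+1) 1).foldl (fun dp j =>
            if i > 0 ∧ j = 0 then pvDpSet dp i j 0
            else if i = 0 ∧ j > 0 then pvDpSet dp i j 1
            else coins.foldl (fun dp coin =>
              if i - coin ≥ 0 then
                pvDpSet dp i j (pvDpGet dp i j + pvDpGet dp (i - coin) (j - 1))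
              else dp) dp) dp)
          (pvDpSet ((PySem.List.pyRange 0 (((N : Nat) : Int)+1) 1).map
            (fun _ => List.replicate ((0 : Int)+1).toNat 0)) 0 0 1))
        ((N : Nat) : Int) 0 from rfl]
  have hr1 : PySem.List.pyRange 0 ((0 : Int)+1) 1 = [(0 : Int)] := by decide
  rcases Nat.eq_zero_or_pos N with hN | hN
  · -- N = 0: the table is [[1]] and the coin loop never fires (all coins ≥ 1)
    subst hN
    have hcoins : ∀ c ∈ coins, (1:Int) ≤ c := h0 rfl
    rw [if_pos rfl]
    have hDP : ((PySem.List.pyRange 0 (((0 : Nat) : Int)+1) 1).map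
        (fun _ => List.replicate ((0 : Int)+1).toNat 0)) = [[ (0:Int) ]] := by decide
    have hdp1 : pvDpSet ([[ (0:Int) ]]) 0 0 1 = [[ (1:Int) ]] := by decide
    have hout : PySem.List.pyRange 0 (((0 : Nat) : Int)+1) 1 = [(0 : Int)] := by decide
    rw [hDP, hdp1, hout]
    simp only [List.foldl_cons, List.foldl_nil, hr1]
    rw [if_neg (by norm_num), if_neg (by norm_num)]
    rw [pvCoinFoldNoop coins hcoins [[ (1:Int) ]]]
    decide
  · -- N ≥ 1: rows 1..N of column 0 stay 0 throughout
    set O2 : Int → List (List Int) → Prop := fun _ dp => pvDims dp N 0 ∧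
      ∀ r', 1 ≤ r' → r' ≤ N → gg dp r' 0 = 0 with hO2
    set DP0 : List (List Int) := (PySem.List.pyRange 0 (((N : Nat) : Int)+1) 1).map
      (fun _ => List.replicate ((0 : Int)+1).toNat 0) with hDP0
    have hdims0 : pvDims DP0 N 0 := by
      constructor
      · simp [hDP0, PySem.List.length_pyRange_one]
        try omega
      · intro r hr
        simp [hDP0]
        try omega
    have hgg0 : ∀ r ≤ N, gg DP0 r 0 = 0 := by
      intro r hr
      have hrl : r < DP0.length := by rw [hdims0.1]; omega
      rw [gg_eq DP0 r 0 hrl (by rw [hdims0.2 r hrl]; omega)]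
      simp [hDP0]
    have hinit : O2 0 (pvDpSet DP0 0 0 1) := by
      constructor
      · have := pvDims_set DP0 N 0 hdims0 0 0 (by omega) 1
        simpa using this
      · intro r' h1r hr'
        have hset := gg_set DP0 N 0 hdims0 0 0 (by omega) (by omega) 1 r' 0 hr' (by omega)
        simp only [Nat.cast_zero] at hset
        rw [hset, if_neg (by omega)]
        exact hgg0 r' hr'
    have hstep : ∀ ii dp, (0:Int) ≤ ii → ii < ((N : Nat) : Int) + 1 → O2 ii dp →
        O2 (ii+1) ((fun dp i =>
          (PySem.List.pyRange 0 ((0 : Int)+1) 1).foldl (fun dp j =>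
            if i > 0 ∧ j = 0 then pvDpSet dp i j 0
            else if i = 0 ∧ j > 0 then pvDpSet dp i j 1
            else coins.foldl (fun dp coin =>
              if i - coin ≥ 0 then
                pvDpSet dp i j (pvDpGet dp i j + pvDpGet dp (i - coin) (j - 1))
              else dp) dp) dp) dp ii) := by
      intro ii dp hi0 hilt hq
      obtain ⟨r, rfl⟩ : ∃ r : Nat, ii = ((r : Nat) : Int) := ⟨ii.toNat, by omega⟩
      obtain ⟨hdp, hzero⟩ := hq
      have hrN : r ≤ N := by omega
      simp only [hr1, List.foldl_cons, List.foldl_nil]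
      by_cases hrpos : (0:Nat) < r
      · rw [if_pos ⟨by omega, by trivial⟩]
        constructor
        · have := pvDims_set dp N 0 hdp r 0 hrN 0
          simpa using this
        · intro r' h1r hr'
          have hset := gg_set dp N 0 hdp r 0 hrN (by omega) 0 r' 0 hr' (by omega)
          simp only [Nat.cast_zero] at hset
          rw [hset]
          split_ifs with h
          · rfl
          · exact hzero r' h1r hr'
      · have hr0 : r = 0 := by omega
        subst hr0
        rw [if_neg (by norm_num), if_neg (by norm_num)]
        have hcf := pvCoinFold00' N 0 coins dp hdp
        simp only [Nat.cast_zero] at ⊢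
        obtain ⟨hcfd, hcfv⟩ := hcf
        refine ⟨hcfd, ?_⟩
        intro r' h1r hr'
        rw [hcfv r' hr' 0 (by omega) (by rintro ⟨hx, -⟩; omega)]
        exact hzero r' h1r hr'
    have hfin := pvRangeFoldInv' _ O2 0 (((N : Nat) : Int)+1) (by omega) hstep
      (pvDpSet DP0 0 0 1) hinit
    obtain ⟨-, hzF⟩ := hfin
    rw [if_neg (by omega)]
    exact hzF N (by omega) le_rfl

lemma pvB_val (N T : Nat) (coins : List Int) (hc : 1 ≤ T → ∀ c ∈ coins, 0 ≤ c) :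
    coin_change_no_more_than_t_coins_alt (N : Int) (T : Int) coins = pvAcc coins T (N : Int) := by
  have e1 : (((N : Int)) + 1).toNat = N + 1 := by omega
  rw [show coin_change_no_more_than_t_coins_alt (N : Int) (T : Int) coins
      = ((PySem.List.pyRange 0 ((T : Nat) : Int) 1).foldl (fun (st : Int × List Int) _ =>
          (st.1 + (PySem.List.pyGet? ((PySem.List.pyRange 1 (((N : Nat) : Int)+1) 1).foldl
              (fun new i => new.set i.toNat (coins.foldl (fun s coin =>
                if i - coin ≥ 0 then s + (PySem.List.pyGet? st.2 (i - coin)).getD 0 else s) 0))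
              (List.replicate (((N : Nat) : Int)+1).toNat 0)) ((N : Nat) : Int)).getD 0,
           (PySem.List.pyRange 1 (((N : Nat) : Int)+1) 1).foldl
              (fun new i => new.set i.toNat (coins.foldl (fun s coin =>
                if i - coin ≥ 0 then s + (PySem.List.pyGet? st.2 (i - coin)).getD 0 else s) 0))
              (List.replicate (((N : Nat) : Int)+1).toNat 0)))
        ((PySem.List.pyGet? ((List.replicate (((N : Nat) : Int)+1).toNat 0).set 0 1) ((N : Nat) : Int)).getD 0,
          (List.replicate (((N : Nat) : Int)+1).toNat 0).set 0 1)).1 from rfl]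
  set L0 : List Int := (List.replicate (((N : Nat) : Int)+1).toNat 0).set 0 1 with hL0def
  have hL0len : L0.length = N + 1 := by simp [hL0def, e1]
  have hL0 : ∀ i ≤ N, gl L0 i = pvLayer coins 0 (i : Int) := by
    intro i hi
    rw [gl_eq L0 i (by omega)]
    simp only [hL0def, List.getElem_set, List.getElem_replicate]
    by_cases h : i = 0
    · subst h; simp [pvLayer]
    · rw [if_neg (by omega), show pvLayer coins 0 (i : Int) = if (i : Int) = 0 then 1 else 0
        from rfl, if_neg (by omega)]
  set QB : Int → Int × List Int → Prop := fun kk st => 0 ≤ kk ∧ st.2.length = N + 1 ∧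
    (∀ i ≤ N, gl st.2 i = pvLayer coins kk.toNat (i : Int)) ∧
    st.1 = pvAcc coins kk.toNat (N : Int) with hQB
  have hinit : QB 0 ((PySem.List.pyGet? L0 ((N : Nat) : Int)).getD 0, L0) := by
    refine ⟨le_rfl, hL0len, ?_, ?_⟩
    · intro i hi
      simpa using hL0 i hi
    · show gl L0 N = _
      rw [hL0 N le_rfl]
      rfl
  have hstep : ∀ i st', (0:Int) ≤ i → i < (T : Int) → QB i st' → QB (i+1) ((fun (st : Int × List Int) (_ : Int) =>
          (st.1 + (PySem.List.pyGet? ((PySem.List.pyRange 1 (((N : Nat) : Int)+1) 1).foldl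
              (fun new i => new.set i.toNat (coins.foldl (fun s coin =>
                if i - coin ≥ 0 then s + (PySem.List.pyGet? st.2 (i - coin)).getD 0 else s) 0))
              (List.replicate (((N : Nat) : Int)+1).toNat 0)) ((N : Nat) : Int)).getD 0,
           (PySem.List.pyRange 1 (((N : Nat) : Int)+1) 1).foldl
              (fun new i => new.set i.toNat (coins.foldl (fun s coin =>
                if i - coin ≥ 0 then s + (PySem.List.pyGet? st.2 (i - coin)).getD 0 else s) 0))
              (List.replicate (((N : Nat) : Int)+1).toNat 0))) st' i) := by
    intro i st' h0 hiT hq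
    obtain ⟨-, hlen, hlay, hans⟩ := hq
    have hcs : ∀ c ∈ coins, 0 ≤ c := hc (by omega)
    simp only []
    set RB : Int → List Int → Prop := fun ii new => new.length = N + 1 ∧
      ∀ i' ≤ N, gl new i' = if 1 ≤ (i' : Int) ∧ (i' : Int) < ii
        then pvLayer coins (i.toNat + 1) (i' : Int) else 0 with hRB
    have hbase : RB 1 (List.replicate (((N : Nat) : Int)+1).toNat 0) := by
      refine ⟨by simp [e1], ?_⟩
      intro i' hi'
      rw [gl_eq _ i' (by simp [e1]; omega), if_neg (by omega)]
      simp
    have histep : ∀ ii new, (1:Int) ≤ ii → ii < ((N : Nat) : Int) + 1 → RB ii new →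
        RB (ii+1) ((fun (new : List Int) (i : Int) => new.set i.toNat (coins.foldl (fun s coin =>
            if i - coin ≥ 0 then s + (PySem.List.pyGet? st'.2 (i - coin)).getD 0 else s) 0)) new ii) := by
      intro ii new h1 hlt hr
      obtain ⟨hlen2, hval⟩ := hr
      simp only []
      have hs : coins.foldl (fun s coin =>
          if ii - coin ≥ 0 then s + (PySem.List.pyGet? st'.2 (ii - coin)).getD 0 else s) 0
          = pvLayer coins (i.toNat + 1) ii := by
        rw [show pvLayer coins (i.toNat + 1) ii = coins.foldl (fun s c =>
            if ii - c ≥ 0 then s + pvLayer coins i.toNat (ii - c) else s) 0 from by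
          rw [show pvLayer coins (i.toNat + 1) ii = if 1 ≤ ii then coins.foldl (fun s c =>
            if ii - c ≥ 0 then s + pvLayer coins i.toNat (ii - c) else s) 0 else 0 from rfl,
            if_pos h1]]
        apply PySem.List.foldl_congr_mem
        intro acc c hcmem
        by_cases hg : ii - c ≥ 0
        · rw [if_pos hg, if_pos hg]
          congr 1
          have hc0 : (0:Int) ≤ c := hcs c hcmem
          have hcast : (((ii - c).toNat : Nat) : Int) = ii - c := by omega
          rw [show (PySem.List.pyGet? st'.2 (ii - c)).getD 0 = gl st'.2 (ii - c).toNat from by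
            unfold gl; rw [hcast]]
          rw [hlay (ii - c).toNat (by omega), hcast]
        · rw [if_neg hg, if_neg hg]
      refine ⟨by simp [hlen2], ?_⟩
      intro i' hi'
      rw [hs, gl_eq _ i' (by simp [hlen2]; omega)]
      rw [List.getElem_set]
      by_cases hm : ii.toNat = i'
      · rw [if_pos hm, if_pos (by omega)]
        congr 1
        omega
      · rw [if_neg hm, ← gl_eq new i' (by omega), hval i' hi']
        by_cases hcond : 1 ≤ (i' : Int) ∧ (i' : Int) < ii
        · rw [if_pos hcond, if_pos (by omega)]
        · rw [if_neg hcond, if_neg (by omega)]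
    have hinner := pvRangeFoldInv' _ RB 1 (((N : Nat) : Int)+1) (by omega) histep
      (List.replicate (((N : Nat) : Int)+1).toNat 0) hbase
    obtain ⟨hlen3, hval3⟩ := hinner
    have hlayN : ∀ i' ≤ N, gl ((PySem.List.pyRange 1 (((N : Nat) : Int)+1) 1).foldl
        (fun new i => new.set i.toNat (coins.foldl (fun s coin =>
          if i - coin ≥ 0 then s + (PySem.List.pyGet? st'.2 (i - coin)).getD 0 else s) 0))
        (List.replicate (((N : Nat) : Int)+1).toNat 0)) i' = pvLayer coins (i.toNat + 1) (i' : Int) := by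
      intro i' hi'
      rw [hval3 i' hi']
      by_cases hcond : 1 ≤ ((i' : Nat) : Int) ∧ ((i' : Nat) : Int) < ((N : Nat) : Int) + 1
      · rw [if_pos hcond]
      · rw [if_neg hcond, pvLayer_nonpos coins (i.toNat + 1) (i' : Int) (by omega) (by omega)]
    refine ⟨by omega, hlen3, ?_, ?_⟩
    · intro i' hi'
      rw [hlayN i' hi']
      congr 1
      omega
    · show st'.1 + _ = _
      rw [show (PySem.List.pyGet? ((PySem.List.pyRange 1 (((N : Nat) : Int)+1) 1).foldl
          (fun new i => new.set i.toNat (coins.foldl (fun s coin =>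
            if i - coin ≥ 0 then s + (PySem.List.pyGet? st'.2 (i - coin)).getD 0 else s) 0))
          (List.replicate (((N : Nat) : Int)+1).toNat 0)) ((N : Nat) : Int)).getD 0
          = pvLayer coins (i.toNat + 1) ((N : Nat) : Int) from hlayN N le_rfl]
      rw [hans]
      rw [show (i+1).toNat = i.toNat + 1 from by omega]
      rfl
  have hfin := pvRangeFoldInv' _ QB 0 ((T : Nat) : Int) (by omega) hstep
    ((PySem.List.pyGet? L0 ((N : Nat) : Int)).getD 0, L0) hinit
  obtain ⟨-, -, -, hout⟩ := hfin
  simpa using hout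

-- ===== VERDICT (by name: the statement is the Claim_ definition above) =====
theorem coin_change_no_more_than_t_coins_spec : Claim_unchanged_coin_change_no_more_than_t_coins := by
  intro n t coins _ hpre hnD
  obtain ⟨hn0, ht0, hcoins⟩ := hpre
  obtain ⟨N, rfl⟩ : ∃ N : Nat, n = (N : Int) := ⟨n.toNat, by omega⟩
  obtain ⟨T, rfl⟩ : ∃ T : Nat, t = (T : Int) := ⟨t.toNat, by omega⟩
  rcases Nat.eq_zero_or_pos T with hT | hT
  · subst hT
    simp only [Nat.cast_zero] at hnD ⊢
    have h0 : N = 0 → ∀ c ∈ coins, (1:Int) ≤ c := by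
      intro hN0 c hcmem
      have hne : c ≠ 0 := by
        intro hc0
        exact hnD ⟨by simp [hN0], rfl, hc0 ▸ hcmem⟩
      rcases hcoins c hcmem with h | h
      · omega
      · subst hN0
        simp only [Nat.cast_zero] at h
        omega
    rw [pvA_val0 N coins h0]
    have hB := pvB_val N 0 coins (fun h1 => absurd h1 (by omega))
    simp only [Nat.cast_zero] at hB
    rw [hB, show pvAcc coins 0 ((N : Nat) : Int) = if ((N : Nat) : Int) = 0 then 1 else 0
      from rfl]
    by_cases hN : N = 0
    · rw [if_pos hN, if_pos (by simp [hN])]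
    · rw [if_neg hN, if_neg (by omega)]
  · have hcs : ∀ c ∈ coins, (0:Int) ≤ c := by
      intro c hcmem
      rcases hcoins c hcmem with h | h
      · exact h
      · exfalso
        have := h.1
        omega
    rw [pvA_val N T hT coins hcs, pvB_val N T coins (fun _ => hcs)]

theorem coin_change_no_more_than_t_coins_changed : Claim_changed_coin_change_no_more_than_t_coins := by
  unfold Claim_changed_coin_change_no_more_than_t_coins; decide

theorem coin_change_no_more_than_t_coins_tight : Claim_exact_coin_change_no_more_than_t_coins := by
  intro n t coins _ hpre hD
  obtain ⟨hn, ht, h0in⟩ := hD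
  subst hn; subst ht
  obtain ⟨-, -, hcoins⟩ := hpre
  have hcs : ∀ c ∈ coins, (0:Int) ≤ c := by
    intro c hc
    rcases hcoins c hc with h | h
    · exact h
    · omega
  have hA : coin_change_no_more_than_t_coins 0 0 coins = 2 ^ (coins.count 0) := by
    rw [show coin_change_no_more_than_t_coins 0 0 coins
        = pvDpGet ((PySem.List.pyRange 0 ((0:Int)+1) 1).foldl (fun dp i =>
            (PySem.List.pyRange 0 ((0:Int)+1) 1).foldl (fun dp j =>
              if i > 0 ∧ j = 0 then pvDpSet dp i j 0
              else if i = 0 ∧ j > 0 then pvDpSet dp i j 1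
              else coins.foldl (fun dp coin =>
                if i - coin ≥ 0 then
                  pvDpSet dp i j (pvDpGet dp i j + pvDpGet dp (i - coin) (j - 1))
                else dp) dp) dp)
            (pvDpSet ((PySem.List.pyRange 0 ((0:Int)+1) 1).map
              (fun _ => List.replicate ((0:Int)+1).toNat 0)) 0 0 1)) 0 0 from rfl]
    rw [show pvDpSet ((PySem.List.pyRange 0 ((0:Int)+1) 1).map
        (fun _ => List.replicate ((0:Int)+1).toNat 0)) 0 0 1 = [[ (1:Int) ]] from by decide]
    rw [show PySem.List.pyRange 0 ((0:Int)+1) 1 = [(0 : Int)] from by decide]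
    simp only [List.foldl_cons, List.foldl_nil]
    rw [if_neg (by norm_num), if_neg (by norm_num)]
    rw [pvCoinFoldDouble coins hcs 1, one_mul]
    simp [pvDpGet]
  have hB : coin_change_no_more_than_t_coins_alt 0 0 coins = 1 := by
    rw [show coin_change_no_more_than_t_coins_alt 0 0 coins
        = ((PySem.List.pyRange 0 (0:Int) 1).foldl (fun (st : Int × List Int) _ =>
            (st.1 + (PySem.List.pyGet? ((PySem.List.pyRange 1 ((0:Int)+1) 1).foldl
                (fun new i => new.set i.toNat (coins.foldl (fun s coin =>
                  if i - coin ≥ 0 then s + (PySem.List.pyGet? st.2 (i - coin)).getD 0 else s) 0))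
                (List.replicate ((0:Int)+1).toNat 0)) (0:Int)).getD 0,
             (PySem.List.pyRange 1 ((0:Int)+1) 1).foldl
                (fun new i => new.set i.toNat (coins.foldl (fun s coin =>
                  if i - coin ≥ 0 then s + (PySem.List.pyGet? st.2 (i - coin)).getD 0 else s) 0))
                (List.replicate ((0:Int)+1).toNat 0)))
          ((PySem.List.pyGet? ((List.replicate ((0:Int)+1).toNat 0).set 0 1) (0:Int)).getD 0,
            (List.replicate ((0:Int)+1).toNat 0).set 0 1)).1 from rfl]
    rw [show PySem.List.pyRange 0 (0:Int) 1 = ([] : List Int) from by decide]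
    simp only [List.foldl_nil]
    decide
  rw [hA, hB]
  have hz : 0 < coins.count 0 := List.count_pos_iff.mpr h0in
  have h2 : (2:Int) ≤ 2 ^ (coins.count 0) := by
    calc (2:Int) = 2 ^ 1 := by norm_num
    _ ≤ 2 ^ (coins.count 0) := by
      apply pow_le_pow_right₀ (by norm_num) (by omega)
  omega
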